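-- pv_equiv track=rewrite | github.com/EmperorNao/Preparation | Leetcode/random/k_weakest.py | find
-- ===== SOURCE A (Python) =====
-- def find(a):
--
--     l = -1
--     r = len(a)
--     while r - l > 1:
--         m = (r + l) // 2
--
--         if a[m] <= 0:
--             r = m
--         else:
--             l = m
--
--     return l
-- ===== SOURCE B (Python) =====
-- def find(a):
--     def go(l, r):
--         if r - l <= 1:
--             return l
--         m = (r + l) // 2
--         return go(l, m) if a[m] <= 0 else go(m, r)
--     return go(-1, len(a))
-- ===== Notes on version B (the rewrite author's own statement) =====
-- stated objective: alternative
-- what changed: The imperative while-loop with mutable l/r is replaced by a recursive inner helper go(l, r) that returns l when the interval is closed and otherwise recurses on (l, m) or (m, r), following the identical probe sequence.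
import Mathlib
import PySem

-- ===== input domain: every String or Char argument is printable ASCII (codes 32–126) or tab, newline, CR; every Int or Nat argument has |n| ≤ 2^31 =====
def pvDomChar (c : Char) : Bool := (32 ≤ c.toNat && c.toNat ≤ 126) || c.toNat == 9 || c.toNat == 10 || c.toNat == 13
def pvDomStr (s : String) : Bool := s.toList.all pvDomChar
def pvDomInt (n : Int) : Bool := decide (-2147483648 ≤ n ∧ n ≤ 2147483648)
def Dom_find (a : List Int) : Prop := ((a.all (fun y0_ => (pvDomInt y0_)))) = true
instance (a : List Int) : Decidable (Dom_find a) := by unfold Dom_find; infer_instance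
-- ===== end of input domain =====

-- B replaces A's while-loop over mutable l/r with a recursive helper on the interval; same probes, same result.

-- ===== PORT A =====
-- A's while-loop, transliterated with fuel (a.length + 1 iterations suffice: r - l
-- starts at a.length + 1 and strictly decreases each iteration; the loop exits when r - l ≤ 1).
-- a[m] is always in range on reachable states (l < m < r ≤ a.length, 0 ≤ m), so `.getD 0` never fires.
def findLoopA (a : List Int) : Nat → Int → Int → Int
  | 0, l, _ => l
  | fuel+1, l, r =>
    if r - l > 1 then
      let m := PySem.Int.floordiv (r + l) 2
      if (PySem.List.pyGet? a m).getD 0 ≤ 0 then findLoopA a fuel l m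
      else findLoopA a fuel m r
    else l

def find (a : List Int) : Int := findLoopA a (a.length + 1) (-1) (a.length : Int)

-- ===== PORT B =====
-- Source B's recursive helper go(l, r), via well-founded recursion on the interval width.
def findRecB (a : List Int) (l r : Int) : Int :=
  if r - l ≤ 1 then l
  else
    let m := PySem.Int.floordiv (r + l) 2
    if (PySem.List.pyGet? a m).getD 0 ≤ 0 then findRecB a l m
    else findRecB a m r
termination_by (r - l).toNat
decreasing_by
  all_goals
    rw [PySem.Int.floordiv_eq_ediv_of_pos (by omega : (0:Int) < 2)] at *
    omega

def find_alt (a : List Int) : Int := findRecB a (-1) (a.length : Int)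

-- ===== PRECONDITION & SPEC =====
def Spec_find (a : List Int) (out : Int) : Prop := out = find_alt a
instance (a : List Int) (out : Int) : Decidable (Spec_find a out) := by unfold Spec_find; infer_instance

-- ===== CLAIM (what is proved, stated in full; the proofs are below) =====
def Claim_equal_find : Prop := ∀ (a : List Int), Dom_find a → Spec_find a (find a)

-- ===== LEMMAS AND PROOFS =====
theorem findLoopA_eq_findRecB (a : List Int) (fuel : Nat) (l r : Int)
    (h : (r - l).toNat ≤ fuel + 1) : findLoopA a fuel l r = findRecB a l r := by
  induction fuel generalizing l r with
  | zero =>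
    have hrl : r - l ≤ 1 := by omega
    rw [findRecB, if_pos hrl]
    rfl
  | succ n ih =>
    rw [findRecB, findLoopA]
    by_cases hgt : r - l > 1
    · have hm := PySem.Int.floordiv_eq_ediv_of_pos (b := 2) (a := r + l) (by omega)
      simp only [if_pos hgt, if_neg (by omega : ¬ r - l ≤ 1)]
      split
      · exact ih l _ (by rw [hm]; omega)
      · exact ih _ r (by rw [hm]; omega)
    · rw [if_neg hgt, if_pos (by omega : r - l ≤ 1)]

-- ===== VERDICT (by name: the statement is the Claim_ definition above) =====
theorem find_spec : Claim_equal_find := by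
  intro a _
  unfold Spec_find find find_alt
  exact findLoopA_eq_findRecB a (a.length + 1) (-1) (a.length : Int) (by omega)
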